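-- pv_equiv track=rewrite | github.com/0xbet-ai/QuantDesk | fixtures/mock-agent/dispatch.py | is_affirmative
-- ===== SOURCE A (Python) =====
-- AFFIRMATIVE = {
--     "yes",
--     "y",
--     "go",
--     "ok",
--     "okay",
--     "sure",
--     "do it",
--     "proceed",
--     "confirm",
--     "confirmed",
--     "please do",
--     "let's go",
--     "lets go",
--     "approve",
--     "approved",
-- }
--
-- def is_affirmative(text: str) -> bool:
--     t = text.strip().lower().rstrip(".!")
--     if not t:
--         return False
--     if t in AFFIRMATIVE:
--         return True
--     # `yes, but ...` / `go ahead and ...` count too — the server lets the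
--     # agent re-state the parameters on the execution turn.
--     for prefix in ("yes", "go", "ok", "okay", "sure", "proceed"):
--         if t.startswith(prefix + " ") or t.startswith(prefix + ","):
--             return True
--     return False
-- ===== SOURCE B (Python) =====
-- AFFIRMATIVE = {
--     "yes", "y", "go", "ok", "okay", "sure", "do it", "proceed",
--     "confirm", "confirmed", "please do", "let's go", "lets go",
--     "approve", "approved",
-- }
--
-- FIRST_WORDS = {"yes", "go", "ok", "okay", "sure", "proceed"}
--
-- def is_affirmative(text: str) -> bool:
--     t = text.strip().lower().rstrip(".!")
--     # index of the first space/comma, or len(t) if there is none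
--     cut = next((i for i, ch in enumerate(t) if ch in " ,"), len(t))
--     return t in AFFIRMATIVE or (cut < len(t) and t[:cut] in FIRST_WORDS)
-- ===== Notes on version B (the rewrite author's own statement) =====
-- stated objective: simpler
-- what changed: A tries 6 prefixes x 2 delimiters with startswith plus early returns; B is one boolean expression: locate the first space/comma, and accept iff the whole string is in AFFIRMATIVE or a delimiter exists and the first token is in FIRST_WORDS.
import Mathlib
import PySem

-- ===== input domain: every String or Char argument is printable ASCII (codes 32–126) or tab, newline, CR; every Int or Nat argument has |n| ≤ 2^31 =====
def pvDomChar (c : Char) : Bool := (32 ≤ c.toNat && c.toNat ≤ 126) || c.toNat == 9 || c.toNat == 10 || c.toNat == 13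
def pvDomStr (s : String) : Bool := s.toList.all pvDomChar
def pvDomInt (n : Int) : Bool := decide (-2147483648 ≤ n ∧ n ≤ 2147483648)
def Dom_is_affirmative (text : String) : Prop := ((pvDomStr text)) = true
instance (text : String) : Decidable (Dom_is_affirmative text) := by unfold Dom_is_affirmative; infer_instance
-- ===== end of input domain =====

-- B replaces A's early-return chain with a 6×2 startswith prefix loop by a single
-- boolean expression: find the first space/comma and look the first token up in a set
-- (objective: simpler).

-- shared normalization pipeline text.strip().lower().rstrip(".!");
-- rstrip(".!") ported by hand (exact: drops the trailing run of '.' and '!' characters)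
def pvNorm (text : String) : List Char :=
  ((PySem.Chars.lower (PySem.Chars.strip text.toList)).reverse.dropWhile
    (fun c => c == '.' || c == '!')).reverse

-- ===== PORT A =====
-- module constant AFFIRMATIVE: a Python set of distinct string literals → list of its distinct elements
def pvAffirmative : List (List Char) :=
  [['y', 'e', 's'],
   ['y'],
   ['g', 'o'],
   ['o', 'k'],
   ['o', 'k', 'a', 'y'],
   ['s', 'u', 'r', 'e'],
   ['d', 'o', ' ', 'i', 't'],
   ['p', 'r', 'o', 'c', 'e', 'e', 'd'],
   ['c', 'o', 'n', 'f', 'i', 'r', 'm'],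
   ['c', 'o', 'n', 'f', 'i', 'r', 'm', 'e', 'd'],
   ['p', 'l', 'e', 'a', 's', 'e', ' ', 'd', 'o'],
   ['l', 'e', 't', '\'', 's', ' ', 'g', 'o'],
   ['l', 'e', 't', 's', ' ', 'g', 'o'],
   ['a', 'p', 'p', 'r', 'o', 'v', 'e'],
   ['a', 'p', 'p', 'r', 'o', 'v', 'e', 'd']]

def pvPrefixes : List (List Char) :=
  [['y', 'e', 's'], ['g', 'o'], ['o', 'k'], ['o', 'k', 'a', 'y'], ['s', 'u', 'r', 'e'], ['p', 'r', 'o', 'c', 'e', 'e', 'd']]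

def is_affirmative (text : String) : Bool :=
  let t := pvNorm text
  if t = [] then false
  else if pvAffirmative.contains t then true
  else pvPrefixes.any (fun p =>
    PySem.Chars.startswith t (p ++ [' ']) || PySem.Chars.startswith t (p ++ [',']))

-- ===== PORT B =====
-- B's sets, written as in Source B (string literals)
def pvAffirmativeB : List (List Char) :=
  (["yes", "y", "go", "ok", "okay", "sure", "do it", "proceed",
    "confirm", "confirmed", "please do", "let's go", "lets go",
    "approve", "approved"]).map String.toList

def pvFirstWords : List (List Char) :=
  (["yes", "go", "ok", "okay", "sure", "proceed"]).map String.toList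

def is_affirmative_alt (text : String) : Bool :=
  let t := pvNorm text
  -- cut = index of the first space/comma, or len(t) if there is none
  let cut := (t.takeWhile (fun c => !(c == ' ' || c == ','))).length
  pvAffirmativeB.contains t || (decide (cut < t.length) && pvFirstWords.contains (t.take cut))

-- ===== PRECONDITION & SPEC =====
def Spec_is_affirmative (text : String) (out : Bool) : Prop := out = is_affirmative_alt text
instance (text : String) (out : Bool) : Decidable (Spec_is_affirmative text out) := by unfold Spec_is_affirmative; infer_instance

-- ===== CLAIM (what is proved, stated in full; the proofs are below) =====
def Claim_equal_is_affirmative : Prop := ∀ (text : String), Dom_is_affirmative text → Spec_is_affirmative text (is_affirmative text)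

-- ===== LEMMAS AND PROOFS =====

def pvDelim (c : Char) : Bool := c == ' ' || c == ','

lemma affirmativeB_eq : pvAffirmativeB = pvAffirmative := by decide

lemma takeWhile_all_append (q : Char → Bool) (p : List Char)
    (hp : ∀ c ∈ p, q c = true) (d : Char) (hd : q d = false) (r : List Char) :
    (p ++ d :: r).takeWhile q = p := by
  induction p with
  | nil => simp [hd]
  | cons a as ih =>
      have ha : q a = true := hp a (by simp)
      simp [ha]
      exact ih (fun c hc => hp c (by simp [hc]))

-- A's startswith loop computes B's "delimiter exists and first token in the set" test
lemma tail_eq (t : List Char) :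
    pvPrefixes.any (fun p =>
      PySem.Chars.startswith t (p ++ [' ']) || PySem.Chars.startswith t (p ++ [','])) =
    (decide ((t.takeWhile (fun c => !(c == ' ' || c == ','))).length < t.length) &&
      pvFirstWords.contains (t.take (t.takeWhile (fun c => !(c == ' ' || c == ','))).length)) := by
  have hq : (fun c : Char => !(c == ' ' || c == ',')) = (fun c => !pvDelim c) := rfl
  rw [hq]
  have hall : ∀ p ∈ pvPrefixes, ∀ c ∈ p, (!pvDelim c) = true := by
    intro p hp c hc
    fin_cases hp <;> fin_cases hc <;> rfl
  have hsplitlen : (t.takeWhile (fun c => !pvDelim c)).length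
      + (t.dropWhile (fun c => !pvDelim c)).length = t.length := by
    conv_rhs => rw [← List.takeWhile_append_dropWhile (p := fun c => !pvDelim c) (l := t)]
    rw [List.length_append]
  have htake : t.take (t.takeWhile (fun c => !pvDelim c)).length
      = t.takeWhile (fun c => !pvDelim c) :=
    (List.prefix_iff_eq_take.mp (List.takeWhile_prefix _)).symm
  rw [htake]
  by_cases h : t.dropWhile (fun c => !pvDelim c) = []
  · -- no delimiter in t at all: every startswith is false, and cut = len(t)
    have hnd : ∀ c ∈ t, (!pvDelim c) = true := List.dropWhile_eq_nil_iff.mp h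
    have hlen : ¬ ((t.takeWhile (fun c => !pvDelim c)).length < t.length) := by
      rw [h] at hsplitlen; simp at hsplitlen; omega
    rw [decide_eq_false hlen, Bool.false_and, List.any_eq_false]
    intro p _
    have key : ∀ d' : Char, pvDelim d' = true →
        PySem.Chars.startswith t (p ++ [d']) = true → False := by
      intro d' hd' hsw
      rw [PySem.Chars.startswith_iff] at hsw
      obtain ⟨r', hr'⟩ := hsw
      have hmem : d' ∈ t := by rw [← hr']; simp
      have := hnd d' hmem
      simp [hd'] at this
    simp only [Bool.or_eq_true, not_or]
    exact ⟨fun hsw => key ' ' (by decide) hsw, fun hsw => key ',' (by decide) hsw⟩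
  · -- t = tok ++ d :: r with d a delimiter
    obtain ⟨d, r, hdr⟩ : ∃ d r, t.dropWhile (fun c => !pvDelim c) = d :: r := by
      cases hdw : t.dropWhile (fun c => !pvDelim c) with
      | nil => exact absurd hdw h
      | cons d r => exact ⟨d, r, rfl⟩
    have hne : List.dropWhile (fun c => !pvDelim c) t ≠ [] := by simp [hdr]
    have hd : pvDelim d = true := by
      have h1 := List.head_dropWhile_not (fun c => !pvDelim c) hne
      have h2 : (List.dropWhile (fun c => !pvDelim c) t).head hne = d := by simp [hdr]
      rw [h2] at h1
      simpa using h1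
    set tok := t.takeWhile (fun c => !pvDelim c) with htok
    have hlen : tok.length < t.length := by rw [hdr] at hsplitlen; simp at hsplitlen; omega
    rw [decide_eq_true hlen, Bool.true_and]
    have hsplit : t = tok ++ d :: r := by
      conv_lhs => rw [← List.takeWhile_append_dropWhile (p := fun c => !pvDelim c) (l := t)]
      rw [hdr]
    have key : ∀ p ∈ pvPrefixes, ∀ d' : Char, pvDelim d' = true →
        PySem.Chars.startswith t (p ++ [d']) = true → p = tok := by
      intro p hp d' hd' hsw
      rw [PySem.Chars.startswith_iff] at hsw
      obtain ⟨r', hr'⟩ := hsw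
      have hr'' : p ++ d' :: r' = t := by rw [← hr']; simp
      rw [htok, ← hr'', takeWhile_all_append _ p (hall p hp) d' (by simp [hd']) r']
    have hFP : pvFirstWords = pvPrefixes := by decide
    by_cases hmem : pvFirstWords.contains tok = true
    · have htokP : tok ∈ pvPrefixes := by
        have h1 : tok ∈ pvFirstWords := by simpa using hmem
        rw [hFP] at h1; exact h1
      rw [hmem, List.any_eq_true]
      refine ⟨tok, htokP, ?_⟩
      have hd' : d = ' ' ∨ d = ',' := by
        revert hd; simp only [pvDelim, Bool.or_eq_true, beq_iff_eq]
        exact fun h => h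
      rcases hd' with rfl | rfl
      · rw [Bool.or_eq_true]; left
        rw [PySem.Chars.startswith_iff]
        exact ⟨r, by rw [hsplit]; simp⟩
      · rw [Bool.or_eq_true]; right
        rw [PySem.Chars.startswith_iff]
        exact ⟨r, by rw [hsplit]; simp⟩
    · have hmem' : pvFirstWords.contains tok = false := by simpa using hmem
      have hnot : tok ∉ pvFirstWords := by simpa using hmem'
      rw [hmem', List.any_eq_false]
      intro p hp
      simp only [Bool.or_eq_true, not_or]
      have bad : ∀ d' : Char, pvDelim d' = true →
          PySem.Chars.startswith t (p ++ [d']) = true → False := by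
        intro d' hd' hsw
        have hpe : p = tok := key p hp d' hd' hsw
        subst hpe
        exact hnot (by rw [hFP]; exact hp)
      exact ⟨fun hsw => bad ' ' (by decide) hsw, fun hsw => bad ',' (by decide) hsw⟩

-- ===== VERDICT (by name: the statement is the Claim_ definition above) =====
theorem is_affirmative_spec : Claim_equal_is_affirmative := by
  intro text _
  unfold Spec_is_affirmative is_affirmative is_affirmative_alt
  simp only [affirmativeB_eq]
  set t := pvNorm text with ht
  by_cases h0 : t = []
  · rw [h0]; decide
  · rw [if_neg h0]
    by_cases h1 : pvAffirmative.contains t = true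
    · rw [if_pos h1, h1, Bool.true_or]
    · have h1' : pvAffirmative.contains t = false := by simpa using h1
      rw [if_neg h1, h1', Bool.false_or]
      exact tail_eq t
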